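-- pv_equiv track=rewrite | github.com/lilyzhng/OpenEnv | hackathon/scripts/extract_html.py | extract_heredoc
-- ===== SOURCE A (Python) =====
-- def extract_heredoc(lines: list[str], start_idx: int) -> str | None:
--     """Extract content from a heredoc block starting after the COMMAND line.
--
--     Looks for content between the COMMAND line and EOF.
--     """
--     # Find the actual HTML start (<!DOCTYPE or <html)
--     html_lines = []
--     collecting = False
--     for i in range(start_idx + 1, len(lines)):
--         line = lines[i]
--         if line.strip() == "EOF":
--             break
--         if line.strip().startswith("<!DOCTYPE") or line.strip().startswith("<html"):
--             collecting = True
--         if collecting: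
--             html_lines.append(line)
--
--     if html_lines:
--         return "\n".join(html_lines)
--     return None
-- ===== SOURCE B (Python) =====
-- def extract_heredoc(lines: list[str], start_idx: int) -> str | None:
--     """Extract content from a heredoc block starting after the COMMAND line."""
--     block = [lines[i] for i in range(start_idx + 1, len(lines))]
--     # 1) cut the block at the EOF terminator
--     body = []
--     for l in block:
--         if l.strip() == "EOF":
--             break
--         body.append(l)
--     # 2) drop leading non-HTML lines; join the suffix from the first HTML line
--     j = 0
--     while j < len(body):
--         s = body[j].strip()
--         if s.startswith("<!DOCTYPE") or s.startswith("<html"):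
--             return "\n".join(body[j:])
--         j += 1
--     return None
-- ===== Notes on version B (the rewrite author's own statement) =====
-- stated objective: simpler
-- what changed: Replaces A's flag-driven single loop (collecting/break state machine) with a three-step pipeline: fetch the block after start_idx, cut it at the EOF terminator, then drop leading non-HTML lines and join the suffix.
import Mathlib
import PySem

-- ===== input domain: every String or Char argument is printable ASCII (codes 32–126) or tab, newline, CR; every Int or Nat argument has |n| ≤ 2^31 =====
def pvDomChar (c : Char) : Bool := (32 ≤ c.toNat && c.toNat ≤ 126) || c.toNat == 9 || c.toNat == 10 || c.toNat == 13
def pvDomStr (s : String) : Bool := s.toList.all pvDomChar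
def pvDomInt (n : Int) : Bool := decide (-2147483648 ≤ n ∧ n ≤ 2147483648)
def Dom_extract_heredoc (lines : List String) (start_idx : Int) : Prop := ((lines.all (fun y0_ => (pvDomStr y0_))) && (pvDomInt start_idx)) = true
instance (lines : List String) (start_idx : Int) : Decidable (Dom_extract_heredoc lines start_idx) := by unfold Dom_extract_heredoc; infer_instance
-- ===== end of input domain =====

-- B replaces A's flag-driven single loop with a fetch-block / cut-at-EOF / drop-prefix pipeline (simpler decomposition, same cost).

-- the two tests both Pythons spell out inline: line.strip() == "EOF", and
-- line.strip().startswith("<!DOCTYPE") or line.strip().startswith("<html")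
def pvIsEOF (l : String) : Bool := PySem.Str.strip l == "EOF"
def pvTrig (l : String) : Bool :=
  PySem.Str.startswith (PySem.Str.strip l) "<!DOCTYPE" || PySem.Str.startswith (PySem.Str.strip l) "<html"

-- ===== PORT A =====
-- loop body of A's for-loop, as a helper on the fetched line; state = (html_lines, collecting, broke)
def extract_heredoc_step (st : List String × Bool × Bool) (line : String) : List String × Bool × Bool :=
  if st.2.2 then st  -- after 'break': remaining iterations do nothing
  else if pvIsEOF line then (st.1, st.2.1, true)
  else
    let collecting := st.2.1 || pvTrig line
    (if collecting then st.1 ++ [line] else st.1, collecting, false)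

-- A's final 'if html_lines: return "\n".join(html_lines); return None'
def extract_heredoc_finish (st : List String × Bool × Bool) : Option String :=
  if st.1 = [] then none else some (PySem.Str.join "\n" st.1)

def extract_heredoc (lines : List String) (start_idx : Int) : Option String :=
  extract_heredoc_finish
    ((PySem.List.pyRange (start_idx + 1) (PySem.List.len lines) 1).foldl
      (fun st i => extract_heredoc_step st (PySem.List.pyGetD lines i ""))  -- total form of lines[i]; in range under Pre_
      ([], false, false))

-- ===== PORT B =====
-- step 1 of Source B: copy the block until a line strips to "EOF" (the for/break loop)
def pvCutEOF (xs : List String) : List String :=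
  match xs with
  | [] => []
  | l :: ls => if pvIsEOF l then [] else l :: pvCutEOF ls

-- step 2 of Source B: advance past leading non-HTML lines; on the first trigger join the suffix
def pvDropToHTML (xs : List String) : Option String :=
  match xs with
  | [] => none
  | l :: ls => if pvTrig l then some (PySem.Str.join "\n" (l :: ls)) else pvDropToHTML ls

def extract_heredoc_alt (lines : List String) (start_idx : Int) : Option String :=
  -- Source B's 'block = [lines[i] for i in range(start_idx+1, len(lines))]' (pyGetD: total form, in range under Pre_)
  let block := (PySem.List.pyRange (start_idx + 1) (PySem.List.len lines) 1).map
    (fun i => PySem.List.pyGetD lines i "")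
  pvDropToHTML (pvCutEOF block)

-- ===== PRECONDITION & SPEC =====
-- Pre_ excludes exactly the inputs on which both Pythons raise IndexError: when
-- start_idx + 1 < -len(lines), the first index fetched is out of range for lines.
def Pre_extract_heredoc (lines : List String) (start_idx : Int) : Prop := -(lines.length : Int) ≤ start_idx + 1
instance (lines : List String) (start_idx : Int) : Decidable (Pre_extract_heredoc lines start_idx) := by unfold Pre_extract_heredoc; infer_instance
def pvWitness_extract_heredoc : List String × Int := (["<html>", "hi", "EOF"], 0)

def Spec_extract_heredoc (lines : List String) (start_idx : Int) (out : Option String) : Prop := out = extract_heredoc_alt lines start_idx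
instance (lines : List String) (start_idx : Int) (out : Option String) : Decidable (Spec_extract_heredoc lines start_idx out) := by unfold Spec_extract_heredoc; infer_instance

-- ===== CLAIM (what is proved, stated in full; the proofs are below) =====
def Claim_equal_extract_heredoc : Prop := ∀ (lines : List String) (start_idx : Int), Dom_extract_heredoc lines start_idx → Pre_extract_heredoc lines start_idx → Spec_extract_heredoc lines start_idx (extract_heredoc lines start_idx)

-- ===== LEMMAS AND PROOFS =====

-- what A's loop collects from a fresh (not yet collecting) state
def pvCollect (xs : List String) : List String :=
  match xs with
  | [] => []
  | l :: ls =>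
    if pvIsEOF l then []
    else if pvTrig l then l :: pvCutEOF ls
    else pvCollect ls

theorem foldl_step_broke (xs : List String) (h : List String) (c : Bool) :
    xs.foldl extract_heredoc_step (h, c, true) = (h, c, true) := by
  induction xs with
  | nil => rfl
  | cons l ls ih => simpa [extract_heredoc_step] using ih

theorem foldl_step_collecting (xs : List String) (h : List String) :
    (xs.foldl extract_heredoc_step (h, true, false)).1 = h ++ pvCutEOF xs := by
  induction xs generalizing h with
  | nil => simp [pvCutEOF]
  | cons l ls ih =>
    by_cases he : pvIsEOF l = true
    · simp [extract_heredoc_step, he, pvCutEOF, foldl_step_broke]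
    · simp [extract_heredoc_step, he, pvCutEOF, ih]

theorem foldl_step_fresh (xs : List String) (h : List String) :
    (xs.foldl extract_heredoc_step (h, false, false)).1 = h ++ pvCollect xs := by
  induction xs generalizing h with
  | nil => simp [pvCollect]
  | cons l ls ih =>
    by_cases he : pvIsEOF l = true
    · simp [extract_heredoc_step, he, pvCollect, foldl_step_broke]
    · by_cases ht : pvTrig l = true
      · simp [extract_heredoc_step, he, ht, pvCollect, foldl_step_collecting]
      · simp [extract_heredoc_step, he, ht, pvCollect, ih]

theorem dropToHTML_cutEOF (xs : List String) :
    pvDropToHTML (pvCutEOF xs)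
      = if pvCollect xs = [] then none else some (PySem.Str.join "\n" (pvCollect xs)) := by
  induction xs with
  | nil => simp [pvCutEOF, pvDropToHTML, pvCollect]
  | cons l ls ih =>
    by_cases he : pvIsEOF l = true
    · simp [pvCutEOF, he, pvDropToHTML, pvCollect]
    · by_cases ht : pvTrig l = true
      · simp [pvCutEOF, he, pvDropToHTML, ht, pvCollect]
      · simp [pvCutEOF, he, pvDropToHTML, ht, pvCollect, ih]

-- ===== VERDICT (by name: the statement is the Claim_ definition above) =====
theorem extract_heredoc_spec : Claim_equal_extract_heredoc := by
  intro lines start_idx _ _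
  unfold Spec_extract_heredoc extract_heredoc extract_heredoc_alt
  rw [show ((PySem.List.pyRange (start_idx + 1) (PySem.List.len lines) 1).foldl
        (fun st i => extract_heredoc_step st (PySem.List.pyGetD lines i "")) ([], false, false))
      = (((PySem.List.pyRange (start_idx + 1) (PySem.List.len lines) 1).map
        (fun i => PySem.List.pyGetD lines i "")).foldl extract_heredoc_step ([], false, false))
      from (List.foldl_map ..).symm]
  show _ = pvDropToHTML (pvCutEOF _)
  rw [dropToHTML_cutEOF]
  unfold extract_heredoc_finish
  rw [foldl_step_fresh]
  simp
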